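-- pv_equiv track=rewrite | github.com/nueladeyemi1/Tip-302 | Linked List/Python DSA/Amazon ServerType.py | minimize_inefficiency
-- ===== SOURCE A (Python) =====
-- def calculate_inefficiency(server_type):
--     inefficiency = 0
--     for i in range(1, len(server_type)):
--         if server_type[i] != server_type[i - 1]:
--             inefficiency += 1
--     return inefficiency
--
-- def minimize_inefficiency(server_type):
--     server_type_list = list(server_type)
--
--     for i in range(len(server_type_list)):
--         if server_type_list[i] == '?':
--             # Calculate inefficiency when replacing with '0'
--             server_type_list[i] = '0'
--             inefficiency_with_0 = calculate_inefficiency(server_type_list)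
--
--             # Calculate inefficiency when replacing with '1'
--             server_type_list[i] = '1'
--             inefficiency_with_1 = calculate_inefficiency(server_type_list)
--
--             # Choose the replacement that minimizes inefficiency
--             if inefficiency_with_0 <= inefficiency_with_1:
--                 server_type_list[i] = '0'
--             else:
--                 server_type_list[i] = '1'
--
--     final_inefficiency = calculate_inefficiency(server_type_list)
--     return final_inefficiency
-- ===== SOURCE B (Python) =====
-- def minimize_inefficiency(server_type):
--     # One fused left-to-right pass: each '?' is decided by comparing the O(1)
--     # local cost against its resolved left neighbor and its (raw) right neighbor,
--     # and adjacent mismatches are counted in the same pass.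
--     total = 0
--     prev = None
--     n = len(server_type)
--     for i, c in enumerate(server_type):
--         if c == '?':
--             right = server_type[i + 1] if i + 1 < n else None
--             cost0 = (prev is not None and prev != '0') + (right is not None and right != '0')
--             cost1 = (prev is not None and prev != '1') + (right is not None and right != '1')
--             c = '0' if cost0 <= cost1 else '1'
--         if prev is not None and c != prev:
--             total += 1
--         prev = c
--     return total
-- ===== Notes on version B (the rewrite author's own statement) =====
-- stated objective: faster
-- what changed: Replaced the quadratic loop that recomputes the whole string's inefficiency twice per '?' by a single fused left-to-right pass that decides each '?' from an O(1) comparison of its resolved left neighbor and raw right neighbor while counting adjacent mismatches in the same pass.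
import Mathlib
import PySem

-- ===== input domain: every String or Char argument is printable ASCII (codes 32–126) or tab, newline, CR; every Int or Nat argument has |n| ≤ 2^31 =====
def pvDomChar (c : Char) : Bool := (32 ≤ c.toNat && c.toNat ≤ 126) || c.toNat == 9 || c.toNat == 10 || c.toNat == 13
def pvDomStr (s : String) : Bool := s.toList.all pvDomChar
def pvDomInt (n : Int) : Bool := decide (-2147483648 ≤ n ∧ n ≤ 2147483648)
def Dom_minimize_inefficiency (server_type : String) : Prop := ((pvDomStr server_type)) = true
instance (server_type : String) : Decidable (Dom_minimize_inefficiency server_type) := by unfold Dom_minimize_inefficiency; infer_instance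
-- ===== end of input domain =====

-- B replaces A's quadratic rescan-per-'?' with one fused O(n) pass deciding each '?' locally; proved equal on all inputs.


-- ===== PORT A =====
-- helper of A: inefficiency = number of adjacent unequal pairs (indices 1..n-1 are always in range, so pyGetD is exact)
def calculate_inefficiency (server_type : List Char) : Int :=
  (PySem.List.pyRange 1 server_type.length 1).foldl
    (fun inefficiency i =>
      if PySem.List.pyGetD server_type i ' ' ≠ PySem.List.pyGetD server_type (i - 1) ' ' then inefficiency + 1
      else inefficiency)
    0

def minimize_inefficiency (server_type : String) : Int :=
  let server_type_list := server_type.toList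
  let final :=
    (PySem.List.pyRange 0 server_type_list.length 1).foldl
      (fun lst i =>
        if PySem.List.pyGetD lst i ' ' = '?' then
          -- i ∈ range(len) is always a valid index, so pySetD is exact
          let with0 := PySem.List.pySetD lst i '0'
          let inefficiency_with_0 := calculate_inefficiency with0
          let with1 := PySem.List.pySetD lst i '1'
          let inefficiency_with_1 := calculate_inefficiency with1
          if inefficiency_with_0 ≤ inefficiency_with_1 then PySem.List.pySetD lst i '0'
          else PySem.List.pySetD lst i '1'
        else lst)
      server_type_list
  calculate_inefficiency final

-- ===== PORT B =====
def minimize_inefficiency_alt (server_type : String) : Int :=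
  let s := server_type.toList
  let n : Int := s.length
  let res :=
    (PySem.List.enumerate s).foldl
      (fun (st : Int × Option Char) (p : Int × Char) =>
        let total := st.1
        let prev := st.2
        let i := p.1
        let c0 := p.2
        let c :=
          if c0 = '?' then
            let right := if i + 1 < n then PySem.List.pyGet? s (i + 1) else none
            let cost0 : Int :=
              (match prev with | none => 0 | some pc => if pc ≠ '0' then 1 else 0)
              + (match right with | none => 0 | some rc => if rc ≠ '0' then 1 else 0)
            let cost1 : Int :=
              (match prev with | none => 0 | some pc => if pc ≠ '1' then 1 else 0)
              + (match right with | none => 0 | some rc => if rc ≠ '1' then 1 else 0)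
            if cost0 ≤ cost1 then '0' else '1'
          else c0
        let total := match prev with | none => total | some pc => if c ≠ pc then total + 1 else total
        (total, some c))
      ((0 : Int), (none : Option Char))
  res.1

-- ===== PRECONDITION & SPEC =====
def Spec_minimize_inefficiency (server_type : String) (out : Int) : Prop := out = minimize_inefficiency_alt server_type
instance (server_type : String) (out : Int) : Decidable (Spec_minimize_inefficiency server_type out) := by unfold Spec_minimize_inefficiency; infer_instance

-- ===== CLAIM (what is proved, stated in full; the proofs are below) =====
def Claim_equal_minimize_inefficiency : Prop := ∀ (server_type : String), Dom_minimize_inefficiency server_type → Spec_minimize_inefficiency server_type (minimize_inefficiency server_type)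

-- ===== LEMMAS AND PROOFS =====

-- mismatch indicator against an optional neighbor
def mN (o : Option Char) (c : Char) : Int :=
  match o with
  | none => 0
  | some x => if x ≠ c then 1 else 0

-- the resolved string both programs build, and its adjacent-mismatch count
def fill (prev : Option Char) : List Char → List Char
  | [] => []
  | c :: t =>
    let c' := if c = '?' then
        (if mN prev '0' + mN t.head? '0' ≤ mN prev '1' + mN t.head? '1' then '0' else '1')
      else c
    c' :: fill (some c') t

def countFrom (prev : Option Char) : List Char → Int
  | [] => 0
  | c :: t => mN prev c + countFrom (some c) t

-- last element of pre, else prev: the left neighbor of the position after pre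
def lastO (prev : Option Char) : List Char → Option Char
  | [] => prev
  | p :: pre => lastO (some p) pre

lemma mN_comm (a b : Char) : mN (some a) b = mN (some b) a := by
  simp [mN, ne_comm]

lemma countFrom_some (c : Char) (t : List Char) :
    countFrom (some c) t = mN t.head? c + countFrom none t := by
  cases t with
  | nil => simp [countFrom, mN]
  | cons x t' => simp [countFrom, mN, eq_comm]

lemma lastO_append_singleton (prev : Option Char) (pre : List Char) (c : Char) :
    lastO prev (pre ++ [c]) = some c := by
  induction pre generalizing prev with
  | nil => rfl
  | cons p pre ih => simpa [lastO] using ih (some p)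

-- the heart: replacing position |pre| changes the count only through its two neighbors
lemma count_diff (pre : List Char) (prev : Option Char) (c0 c1 : Char) (t : List Char) :
    countFrom prev (pre ++ c0 :: t) + mN (lastO prev pre) c1 + mN t.head? c1
      = countFrom prev (pre ++ c1 :: t) + mN (lastO prev pre) c0 + mN t.head? c0 := by
  induction pre generalizing prev with
  | nil =>
      simp only [List.nil_append, countFrom, lastO, countFrom_some]
      have h0 := mN_comm c0 c1
      omega
  | cons p pre ih =>
      simp only [List.cons_append, countFrom, lastO]
      have := ih (some p)
      omega

lemma calcAux (s : List Char) : ∀ (t : List Char) (k : Nat) (acc : Int), s.drop (k + 1) = t →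
    (PySem.List.pyRange ((k : Int) + 1) (s.length : Int) 1).foldl
      (fun inefficiency i =>
        if PySem.List.pyGetD s i ' ' ≠ PySem.List.pyGetD s (i - 1) ' ' then inefficiency + 1 else inefficiency) acc
      = acc + countFrom s[k]? t := by
  intro t
  induction t with
  | nil =>
      intro k acc h
      have hlen : s.length ≤ k + 1 := by
        simpa using List.drop_eq_nil_iff.mp h
      rw [PySem.List.pyRange_one_eq_nil (by exact_mod_cast hlen)]
      simp [countFrom]
  | cons c t' ih =>
      intro k acc h
      have hk1 : k + 1 < s.length := by
        by_contra hge
        rw [List.drop_eq_nil_iff.mpr (by omega)] at h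
        simp at h
      have hget : s[k + 1]? = some c := by
        have : (s.drop (k + 1))[0]? = some c := by rw [h]; rfl
        simpa using this
      have hdrop : s.drop (k + 2) = t' := by
        have := congrArg List.tail h
        simpa [List.tail_drop] using this
      rw [PySem.List.pyRange_one_cons (by exact_mod_cast hk1)]
      rw [List.foldl_cons]
      have hkk : k < s.length := by omega
      have e1 : PySem.List.pyGetD s ((k : Int) + 1) ' ' = s[k + 1] := by
        have := PySem.List.pyGetD_eq_getElem (xs := s) (i := (k : Int) + 1) (d := ' ')
          (by omega) (by exact_mod_cast hk1)
        simpa using this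
      have e2 : PySem.List.pyGetD s ((k : Int) + 1 - 1) ' ' = s[k] := by
        have := PySem.List.pyGetD_eq_getElem (xs := s) (i := (k : Int)) (d := ' ')
          (by omega) (by exact_mod_cast hkk)
        simpa using this
      have harr : ((k : Int) + 1) = (((k + 1 : Nat) : Int)) := by push_cast; ring
      rw [e1, e2, harr, ih (k + 1) _ hdrop]
      have hc : s[k]? = some s[k] := List.getElem?_eq_getElem hkk
      rw [hget, hc]
      simp only [countFrom, mN]
      have : s[k + 1] = c := by
        have := hget
        rw [List.getElem?_eq_getElem hk1] at this
        exact Option.some.inj this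
      subst this
      by_cases hne : s[k + 1] = s[k]
      · simp [hne]
      · have hne' : ¬(s[k] = s[k + 1]) := fun hh => hne hh.symm
        simp [hne, hne']
        omega

lemma calc_eq_countFrom (l : List Char) : calculate_inefficiency l = countFrom none l := by
  cases l with
  | nil => simp [calculate_inefficiency, countFrom, PySem.List.pyRange_one_eq_nil]
  | cons a t =>
      unfold calculate_inefficiency
      have h := calcAux (a :: t) t 0 0 (by simp)
      simp only [Nat.cast_zero, zero_add] at h
      rw [h]
      simp [countFrom, mN]

lemma pySetD_append_length (pre : List Char) (c x : Char) (t : List Char) :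
    PySem.List.pySetD (pre ++ c :: t) ((pre.length : Nat) : Int) x = pre ++ x :: t := by
  rw [PySem.List.pySetD_natCast, List.set_append]
  simp

-- the two loop bodies, named for the proofs (definitionally equal to the inline lambdas of the ports)
def Astep (lst : List Char) (i : Int) : List Char :=
  if PySem.List.pyGetD lst i ' ' = '?' then
    let with0 := PySem.List.pySetD lst i '0'
    let inefficiency_with_0 := calculate_inefficiency with0
    let with1 := PySem.List.pySetD lst i '1'
    let inefficiency_with_1 := calculate_inefficiency with1
    if inefficiency_with_0 ≤ inefficiency_with_1 then PySem.List.pySetD lst i '0'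
    else PySem.List.pySetD lst i '1'
  else lst

def Bstep (s : List Char) (st : Int × Option Char) (p : Int × Char) : Int × Option Char :=
  let total := st.1
  let prev := st.2
  let i := p.1
  let c0 := p.2
  let c :=
    if c0 = '?' then
      let right := if i + 1 < (s.length : Int) then PySem.List.pyGet? s (i + 1) else none
      let cost0 : Int :=
        (match prev with | none => 0 | some pc => if pc ≠ '0' then 1 else 0)
        + (match right with | none => 0 | some rc => if rc ≠ '0' then 1 else 0)
      let cost1 : Int :=
        (match prev with | none => 0 | some pc => if pc ≠ '1' then 1 else 0)
        + (match right with | none => 0 | some rc => if rc ≠ '1' then 1 else 0)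
      if cost0 ≤ cost1 then '0' else '1'
    else c0
  let total := match prev with | none => total | some pc => if c ≠ pc then total + 1 else total
  (total, some c)

-- A's loop resolves '?' left to right exactly as `fill` does
lemma foldA : ∀ (t pre : List Char),
    (PySem.List.pyRange ((pre.length : Nat) : Int) (((pre.length + t.length : Nat) : Int)) 1).foldl
      Astep (pre ++ t)
    = pre ++ fill (lastO none pre) t := by
  intro t
  induction t with
  | nil =>
      intro pre
      rw [PySem.List.pyRange_one_eq_nil (by simp)]
      simp [fill]
  | cons c t' ih =>
      intro pre
      rw [PySem.List.pyRange_one_cons (by push_cast [List.length_cons]; omega)]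
      rw [List.foldl_cons]
      have hget : PySem.List.pyGetD (pre ++ c :: t') ((pre.length : Nat) : Int) ' ' = c := by
        rw [PySem.List.pyGetD_natCast]
        simp [List.getD]
      have hset0 := pySetD_append_length pre c '0' t'
      have hset1 := pySetD_append_length pre c '1' t'
      have key : ∀ c' : Char,
          (PySem.List.pyRange (((pre.length : Nat) : Int) + 1) (((pre.length + (c :: t').length : Nat) : Int)) 1).foldl
            Astep (pre ++ c' :: t')
          = pre ++ c' :: fill (some c') t' := by
        intro c'
        have h := ih (pre ++ [c'])
        have estart : (((pre ++ [c']).length : Nat) : Int) = ((pre.length : Nat) : Int) + 1 := by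
          simp
        have ebound : ((pre ++ [c']).length + t'.length) = (pre.length + (c :: t').length) := by
          simp; omega
        rw [estart, ebound, lastO_append_singleton] at h
        simpa [List.append_assoc] using h
      by_cases hc : c = '?'
      · rw [show Astep (pre ++ c :: t') ((pre.length : Nat) : Int)
              = if calculate_inefficiency (pre ++ '0' :: t') ≤ calculate_inefficiency (pre ++ '1' :: t')
                then pre ++ '0' :: t' else pre ++ '1' :: t' from by
            simp only [Astep, hget, hset0, hset1, if_pos hc]]
        by_cases hle : calculate_inefficiency (pre ++ '0' :: t') ≤ calculate_inefficiency (pre ++ '1' :: t')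
        · rw [if_pos hle, key '0']
          have hfill : fill (lastO none pre) (c :: t') = '0' :: fill (some '0') t' := by
            rw [calc_eq_countFrom, calc_eq_countFrom] at hle
            have hdiff := count_diff pre none '0' '1' t'
            simp only [fill, hc, if_pos]
            rw [if_pos (by omega)]
          rw [hfill]
        · rw [if_neg hle, key '1']
          have hfill : fill (lastO none pre) (c :: t') = '1' :: fill (some '1') t' := by
            rw [calc_eq_countFrom, calc_eq_countFrom] at hle
            have hdiff := count_diff pre none '0' '1' t'
            simp only [fill, hc, if_pos]
            rw [if_neg (by omega)]
          rw [hfill]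
      · rw [show Astep (pre ++ c :: t') ((pre.length : Nat) : Int) = pre ++ c :: t' from by
            simp only [Astep, hget, if_neg hc]]
        rw [key c]
        simp [fill, hc]

-- B's fused pass computes the mismatch count of the filled string
lemma foldB (s : List Char) : ∀ (t : List Char) (k : Nat) (total : Int) (prev : Option Char),
    s.drop k = t →
    ((PySem.List.enumerate t ((k : Nat) : Int)).foldl (Bstep s) (total, prev)).1
    = total + countFrom prev (fill prev t) := by
  intro t
  induction t with
  | nil =>
      intro k total prev h
      simp [PySem.List.enumerate_nil, countFrom, fill]
  | cons c t' ih =>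
      intro k total prev h
      have hdrop' : s.drop (k + 1) = t' := by
        have := congrArg List.tail h
        simpa [List.tail_drop] using this
      have hright : (if ((k : Nat) : Int) + 1 < (s.length : Int) then PySem.List.pyGet? s (((k : Nat) : Int) + 1) else none)
          = t'.head? := by
        by_cases hlt : k + 1 < s.length
        · rw [if_pos (by exact_mod_cast hlt)]
          have hcast : ((k : Nat) : Int) + 1 = (((k + 1 : Nat)) : Int) := by push_cast; ring
          rw [hcast, PySem.List.pyGet?_natCast]
          rw [← hdrop']
          cases hh : s.drop (k + 1) with
          | nil => simp [List.drop_eq_nil_iff] at hh; omega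
          | cons a u =>
              have ha : s[k + 1]? = some a := by
                have h0 : (s.drop (k + 1))[0]? = some a := by rw [hh]; rfl
                simpa using h0
              simp [ha]
        · rw [if_neg (by exact_mod_cast hlt)]
          have ht' : t' = [] := by
            rw [← hdrop']
            exact List.drop_eq_nil_iff.mpr (by omega)
          simp [ht']
      have hmatch : ∀ (o : Option Char) (ch : Char),
          (match o with | none => (0 : Int) | some pc => if pc ≠ ch then 1 else 0) = mN o ch := by
        intro o ch; cases o <;> rfl
      have hk1 : ((k : Nat) : Int) + 1 = (((k + 1 : Nat)) : Int) := by push_cast; ring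
      have hbeta : Bstep s (total, prev) (((k : Nat) : Int), c)
          = (total + mN prev (if c = '?' then
                (if mN prev '0' + mN t'.head? '0' ≤ mN prev '1' + mN t'.head? '1' then '0' else '1')
              else c),
             some (if c = '?' then
                (if mN prev '0' + mN t'.head? '0' ≤ mN prev '1' + mN t'.head? '1' then '0' else '1')
              else c)) := by
        simp only [Bstep, hright, hmatch]
        clear ih h hdrop' hk1 hright hmatch
        cases prev with
        | none => simp [mN]
        | some pc =>
            cases ht : t'.head? with
            | none =>
                simp only [mN]
                split_ifs <;> (try omega) <;> (try simp_all) <;>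
                  first
                    | exact absurd ‹('0' : Char) = pc›.symm (by assumption)
                    | exact absurd ‹('1' : Char) = pc›.symm (by assumption)
            | some rc =>
                simp only [mN]
                split_ifs <;> (try omega) <;> (try simp_all) <;>
                  first
                    | exact absurd ‹('0' : Char) = pc›.symm (by assumption)
                    | exact absurd ‹('1' : Char) = pc›.symm (by assumption)
      rw [PySem.List.enumerate_cons, List.foldl_cons, hk1, hbeta, ih (k + 1) _ _ hdrop']
      simp only [fill, countFrom]
      omega

-- ===== VERDICT (by name: the statement is the Claim_ definition above) =====
theorem minimize_inefficiency_spec : Claim_equal_minimize_inefficiency := by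
  intro s _
  show minimize_inefficiency s = minimize_inefficiency_alt s
  have eA : minimize_inefficiency s
      = calculate_inefficiency ((PySem.List.pyRange 0 (s.toList.length : Int) 1).foldl Astep s.toList) := rfl
  have eB : minimize_inefficiency_alt s
      = ((PySem.List.enumerate s.toList 0).foldl (Bstep s.toList) ((0 : Int), (none : Option Char))).1 := rfl
  have hA := foldA s.toList []
  simp only [List.length_nil, List.nil_append, Nat.cast_zero, Nat.zero_add] at hA
  have hB := foldB s.toList s.toList 0 0 none rfl
  simp only [Nat.cast_zero, zero_add] at hB
  rw [eA, eB, hA, hB, calc_eq_countFrom]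
  rfl
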